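-- pv_equiv track=rewrite | github.com/styagovamaria/2021-2-level-labs | lab_2/main.py | get_sparse_vector
-- ===== SOURCE A (Python) =====
-- def get_language_features(language_profiles: dict) -> list or None:
--     """
--     Gets all unique words from language profiles
--         and sorts them in alphabetical order
--     :param language_profiles: a dictionary of dictionaries - language profiles
--     """
--     if not (
--             isinstance(language_profiles, dict)
--             and language_profiles
--     ):
--         return None
--
--     unique_tokens = []
--     for profile in language_profiles.values():
--         for i in profile.keys():
--             unique_tokens.append(i)
--     features = list(set(unique_tokens))
--     return sorted(features)
--
-- def get_sparse_vector(original_text: list, language_profiles: dict) -> list or None: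
--     """
--     Builds a sparse vector representation of a given text
--         using dictionary with language profiles
--     :param original_text: any tokenized text
--     :param language_profiles: a dictionary of dictionaries - language profiles
--     """
--     if not (
--             isinstance(original_text, list)
--             and all(isinstance(i, str) for i in original_text)
--             and isinstance(language_profiles, dict)
--             and language_profiles
--     ):
--         return None
--
--     features = get_language_features(language_profiles)
--     sparse_vector = []
--
--     vector = dict.fromkeys(features, 0)
--     for language_profile in language_profiles.values():
--         for word, freq in language_profile.items():
--             if freq > vector.get(word):
--                 vector[word] = freq
--     for index, feature in enumerate(features):
--         if feature in original_text:
--             sparse_vector.append([index, vector[feature]])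
--     return sparse_vector
-- ===== SOURCE B (Python) =====
-- def get_sparse_vector(original_text: list, language_profiles: dict) -> list or None:
--     """
--     Builds a sparse vector representation of a given text
--         using dictionary with language profiles
--     """
--     if not (
--             isinstance(original_text, list)
--             and all(isinstance(i, str) for i in original_text)
--             and isinstance(language_profiles, dict)
--             and language_profiles
--     ):
--         return None
--
--     profiles = list(language_profiles.values())
--     features = sorted({word for profile in profiles for word in profile})
--     text_words = set(original_text)
--     return [[index, max(0, *(profile.get(feature, 0) for profile in profiles))]
--             for index, feature in enumerate(features) if feature in text_words]
-- ===== Notes on version B (the rewrite author's own statement) =====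
-- stated objective: faster
-- what changed: B drops A's precomputed max-frequency table (dict.fromkeys plus a nested update loop over all profiles) and computes each emitted feature's value on demand as max(0, profile.get(feature, 0) over the profiles), and tests feature membership against a set built once from the text instead of scanning the text list per feature.
import Mathlib
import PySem

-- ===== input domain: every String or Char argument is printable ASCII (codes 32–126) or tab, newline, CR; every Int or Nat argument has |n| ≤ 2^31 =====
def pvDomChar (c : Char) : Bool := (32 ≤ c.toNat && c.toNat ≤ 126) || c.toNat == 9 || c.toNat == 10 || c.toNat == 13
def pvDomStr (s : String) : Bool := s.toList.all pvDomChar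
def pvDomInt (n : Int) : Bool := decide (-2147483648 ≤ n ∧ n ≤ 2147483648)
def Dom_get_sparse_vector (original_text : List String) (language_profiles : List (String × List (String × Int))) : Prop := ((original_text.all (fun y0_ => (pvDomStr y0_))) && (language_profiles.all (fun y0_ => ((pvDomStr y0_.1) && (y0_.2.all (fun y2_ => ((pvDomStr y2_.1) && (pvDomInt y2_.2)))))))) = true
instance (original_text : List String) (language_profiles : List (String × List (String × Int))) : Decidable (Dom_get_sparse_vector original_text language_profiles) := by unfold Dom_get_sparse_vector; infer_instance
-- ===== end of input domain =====

-- B replaces A's precomputed max-frequency table (dict.fromkeys + a nested update loop) by an on-demand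
-- max over the profiles per emitted feature, testing membership against a set of the text's words
-- instead of scanning the text list per feature (measured faster in a timing run).

-- ===== PORT A =====
-- helper get_language_features of A (guards on a non-empty dict, collects all keys, sorts the distinct ones)
def pvGetLanguageFeatures (language_profiles : List (String × List (String × Int))) : Option (List String) :=
  if language_profiles = [] then none
  else
    let d : PySem.Dict String (PySem.Dict String Int) :=
      PySem.Dict.ofList (language_profiles.map (fun p => (p.1, PySem.Dict.ofList p.2)))
    let unique_tokens : List String :=
      d.values.foldl (fun acc profile => profile.keys.foldl (fun acc i => acc ++ [i]) acc) []
    some (PySem.List.sorted (PySem.Set.ofList unique_tokens) (fun x => x) false)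

def get_sparse_vector (original_text : List String) (language_profiles : List (String × List (String × Int))) : Option (List (List Int)) :=
  if language_profiles = [] then none
  else
    match pvGetLanguageFeatures language_profiles with
    | none => none   -- unreachable: the guard above implies the helper returns a list
    | some features =>
      let d : PySem.Dict String (PySem.Dict String Int) :=
        PySem.Dict.ofList (language_profiles.map (fun p => (p.1, PySem.Dict.ofList p.2)))
      let vector : PySem.Dict String Int :=
        PySem.Dict.ofList (features.map (fun f => (f, (0 : Int))))
      let vector := d.values.foldl
        (fun v profile => profile.items.foldl
          (fun v wf => if v.getD wf.1 0 < wf.2 then v.insert wf.1 wf.2 else v) v) vector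
      some ((PySem.List.enumerate features 0).foldl
        (fun acc p => if original_text.contains p.2 then acc ++ [[p.1, vector.getD p.2 0]] else acc) [])

-- ===== PORT B =====
def get_sparse_vector_alt (original_text : List String) (language_profiles : List (String × List (String × Int))) : Option (List (List Int)) :=
  if language_profiles = [] then none
  else
    let profiles : List (PySem.Dict String Int) :=
      (PySem.Dict.ofList (language_profiles.map (fun p => (p.1, PySem.Dict.ofList p.2)))).values
    let features : List String :=
      PySem.List.sorted (PySem.Set.ofList (profiles.flatMap (fun p => p.keys))) (fun x => x) false
    let text_words : PySem.Set String := PySem.Set.ofList original_text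
    some (((PySem.List.enumerate features 0).filter (fun p => text_words.contains p.2)).map
      (fun p => [p.1, profiles.foldl (fun m prof => max m (prof.getD p.2 0)) 0]))

-- ===== PRECONDITION & SPEC =====
def Spec_get_sparse_vector (original_text : List String) (language_profiles : List (String × List (String × Int))) (out : Option (List (List Int))) : Prop := out = get_sparse_vector_alt original_text language_profiles
instance (original_text : List String) (language_profiles : List (String × List (String × Int))) (out : Option (List (List Int))) : Decidable (Spec_get_sparse_vector original_text language_profiles out) := by unfold Spec_get_sparse_vector; infer_instance

-- ===== CLAIM (what is proved, stated in full; the proofs are below) =====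
def Claim_equal_get_sparse_vector : Prop := ∀ (original_text : List String) (language_profiles : List (String × List (String × Int))), Dom_get_sparse_vector original_text language_profiles → Spec_get_sparse_vector original_text language_profiles (get_sparse_vector original_text language_profiles)

-- ===== LEMMAS AND PROOFS =====

-- the per-(word,freq) update seen through `getD f 0`
theorem pv_getD_step_fold (f : String) (l : List (String × Int)) (v : PySem.Dict String Int) :
    (l.foldl (fun v wf => if v.getD wf.1 0 < wf.2 then v.insert wf.1 wf.2 else v) v).getD f 0
      = l.foldl (fun m wf => if wf.1 = f ∧ m < wf.2 then wf.2 else m) (v.getD f 0) := by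
  induction l generalizing v with
  | nil => rfl
  | cons wf t ih =>
    obtain ⟨w, q⟩ := wf
    simp only [List.foldl_cons]
    rw [ih]
    congr 1
    by_cases hw : w = f
    · by_cases h1 : v.getD w 0 < q
      · rw [if_pos h1, if_pos ⟨hw, hw ▸ h1⟩, PySem.Dict.getD_insert, if_pos hw.symm]
      · rw [if_neg h1, if_neg (fun h => h1 (hw ▸ h.2))]
    · by_cases h1 : v.getD w 0 < q
      · rw [if_pos h1, if_neg (fun h => hw h.1), PySem.Dict.getD_insert,
          if_neg (fun h => hw h.symm)]
      · rw [if_neg h1, if_neg (fun h => hw h.1)]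

-- lookup with default in a literal cons dict
theorem pv_getD_mk_cons (w f : String) (q : Int) (t : List (String × Int)) :
    (PySem.Dict.mk ((w, q) :: t)).getD f 0
      = if w = f then q else (PySem.Dict.mk t).getD f 0 := by
  by_cases hw : w = f
  · rw [PySem.Dict.getD_eq_get?_getD, PySem.Dict.get?_mk_cons, if_pos (by simp [hw]),
      Option.getD_some, if_pos hw]
  · rw [PySem.Dict.getD_eq_get?_getD, PySem.Dict.get?_mk_cons, if_neg (by simpa using hw),
      if_neg hw, PySem.Dict.getD_eq_get?_getD]

-- a fold of the max-update over an assoc list whose key f never occurs is the identity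
theorem pv_fold_max_not_mem (f : String) (l : List (String × Int)) (m : Int)
    (h : f ∉ l.map Prod.fst) :
    l.foldl (fun m wf => if wf.1 = f ∧ m < wf.2 then wf.2 else m) m = m := by
  induction l generalizing m with
  | nil => rfl
  | cons wf t ih =>
    simp only [List.map_cons, List.mem_cons, not_or] at h
    simp only [List.foldl_cons]
    rw [if_neg (fun hc : wf.1 = f ∧ m < wf.2 => h.1 hc.1.symm), ih _ h.2]

-- over an assoc list with distinct keys, the max-update fold is one max against the lookup
theorem pv_fold_max_nodup (f : String) (l : List (String × Int)) (m : Int)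
    (hnd : (l.map Prod.fst).Nodup) (hm : 0 ≤ m) :
    l.foldl (fun m wf => if wf.1 = f ∧ m < wf.2 then wf.2 else m) m
      = max m ((PySem.Dict.mk l).getD f 0) := by
  induction l generalizing m with
  | nil =>
    simp [PySem.Dict.getD_eq_get?_getD, PySem.Dict.get?]
    omega
  | cons wf t ih =>
    obtain ⟨w, q⟩ := wf
    simp only [List.map_cons, List.nodup_cons] at hnd
    simp only [List.foldl_cons]
    rw [pv_getD_mk_cons]
    by_cases hw : w = f
    · rw [if_pos hw, pv_fold_max_not_mem _ t _ (hw ▸ hnd.1)]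
      split_ifs with h1
      · omega
      · have h2 : ¬ m < q := fun hlt => h1 ⟨hw, hlt⟩
        omega
    · rw [if_neg hw, if_neg (fun hc : w = f ∧ m < q => hw hc.1), ih _ hnd.2 hm]

-- the whole nested A-loop seen through `getD f 0` equals B's inline max over the profiles
theorem pv_outer_fold (f : String) (ps : List (PySem.Dict String Int))
    (v : PySem.Dict String Int)
    (hps : ∀ p ∈ ps, p.keys.Nodup) (hv : 0 ≤ v.getD f 0) :
    (ps.foldl (fun v profile => profile.items.foldl
        (fun v wf => if v.getD wf.1 0 < wf.2 then v.insert wf.1 wf.2 else v) v) v).getD f 0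
      = ps.foldl (fun m prof => max m (prof.getD f 0)) (v.getD f 0) := by
  induction ps generalizing v with
  | nil => rfl
  | cons p t ih =>
    simp only [List.foldl_cons]
    have hstep : (p.items.foldl
        (fun v wf => if v.getD wf.1 0 < wf.2 then v.insert wf.1 wf.2 else v) v).getD f 0
        = max (v.getD f 0) (p.getD f 0) := by
      rw [pv_getD_step_fold, pv_fold_max_nodup f p.items _ (hps p (by simp)) hv]
    rw [ih _ (fun p hp => hps p (by simp [hp])) (by rw [hstep]; omega), hstep]

-- `dict.fromkeys(features, 0)` reads 0 at every key
theorem pv_fromkeys_zero (f : String) (l : List (String × Int)) (d : PySem.Dict String Int)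
    (hl : ∀ p ∈ l, p.2 = (0 : Int)) (hd : d.getD f 0 = 0) :
    (l.foldl (fun acc p => acc.insert p.1 p.2) d).getD f 0 = 0 := by
  induction l generalizing d with
  | nil => exact hd
  | cons p t ih =>
    simp only [List.foldl_cons]
    refine ih (d.insert p.1 p.2) (fun r hr => hl r (List.mem_cons_of_mem _ hr)) ?_
    rw [PySem.Dict.getD_insert, hl p List.mem_cons_self]
    split_ifs <;> simp [hd]

-- `PySem.Dict.ofList` of constant-0 pairs, via the fold form
theorem pv_ofList_fromkeys_zero (f : String) (xs : List String) :
    (PySem.Dict.ofList (xs.map (fun x => (x, (0 : Int))))).getD f 0 = 0 := by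
  have h0 : (PySem.Dict.empty : PySem.Dict String Int).getD f 0 = 0 := rfl
  simpa [PySem.Dict.ofList, PySem.Dict.update] using
    pv_fromkeys_zero f (xs.map (fun x => (x, (0 : Int)))) PySem.Dict.empty (by simp) h0

-- every value of a dict built by an insert fold is a value of the start or a .2 of the list
theorem pv_mem_values_foldl {ν : Type} (l : List (String × ν)) (d : PySem.Dict String ν)
    (w : ν) (h : w ∈ (l.foldl (fun acc p => acc.insert p.1 p.2) d).values) :
    w ∈ d.values ∨ ∃ p ∈ l, w = p.2 := by
  induction l generalizing d with
  | nil => exact Or.inl h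
  | cons p t ih =>
    simp only [List.foldl_cons] at h
    rcases ih (d.insert p.1 p.2) h with h' | ⟨p', hp', rfl⟩
    · rcases PySem.Dict.mem_values_insert _ _ _ _ h' with rfl | h''
      · exact Or.inr ⟨p, by simp⟩
      · exact Or.inl h''
    · exact Or.inr ⟨p', by simp [hp']⟩

-- membership in the ofList set, as a Bool equation usable under `filter`
theorem pv_set_contains (ot : List String) (x : String) :
    (PySem.Set.ofList ot).contains x = ot.contains x := by
  rw [PySem.Set.contains_eq_listContains]
  by_cases h : x ∈ ot
  · simp [PySem.Set.mem_ofList, h]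
  · simp [PySem.Set.mem_ofList, h]

-- the central equality
theorem pv_main (original_text : List String) (language_profiles : List (String × List (String × Int))) :
    get_sparse_vector original_text language_profiles
      = get_sparse_vector_alt original_text language_profiles := by
  by_cases h : language_profiles = []
  · simp [get_sparse_vector, get_sparse_vector_alt, h]
  · unfold get_sparse_vector get_sparse_vector_alt pvGetLanguageFeatures
    rw [if_neg h, if_neg h, if_neg h]
    simp only [PySem.List.foldl_append_singleton_eq_self, PySem.List.foldl_append_eq_flatMap,
      List.nil_append]
    set d : PySem.Dict String (PySem.Dict String Int) :=
      PySem.Dict.ofList (language_profiles.map (fun p => (p.1, PySem.Dict.ofList p.2))) with hd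
    set features : List String :=
      PySem.List.sorted (PySem.Set.ofList (d.values.flatMap (fun p => p.keys))) (fun x => x) false
      with hfeat
    have hnodup : ∀ p ∈ d.values, p.keys.Nodup := by
      intro p hp
      rcases pv_mem_values_foldl _ _ _ hp with h' | ⟨q, hq, rfl⟩
      · simp [PySem.Dict.values, PySem.Dict.empty] at h'
      · rcases List.mem_map.mp hq with ⟨r, _, rfl⟩
        exact PySem.Dict.nodup_keys_ofList _
    congr 1
    rw [PySem.List.foldl_append_if]
    rw [List.nil_append]
    have hfilter : (PySem.List.enumerate features 0).filter (fun p => original_text.contains p.2)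
        = (PySem.List.enumerate features 0).filter
            (fun p => (PySem.Set.ofList original_text).contains p.2) := by
      apply List.filter_congr
      intro p _
      rw [pv_set_contains]
    rw [← hfilter]
    apply List.map_congr_left
    intro p _
    congr 1
    rw [pv_outer_fold _ _ _ hnodup (by rw [pv_ofList_fromkeys_zero]),
      pv_ofList_fromkeys_zero]

-- ===== VERDICT (by name: the statement is the Claim_ definition above) =====
theorem get_sparse_vector_spec : Claim_equal_get_sparse_vector := by
  intro original_text language_profiles _
  unfold Spec_get_sparse_vector
  exact pv_main original_text language_profiles
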